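-- pv_equiv track=rewrite | github.com/Gorlevichd/algo_handbook | backpack/souvenires.py | diverse_souvenires
-- ===== SOURCE A (Python) =====
-- def find_min(price_list):
--     current_min = price_list[0]
--     current_index = 0
--     for i, price in enumerate(price_list):
--         if price < current_min:
--             current_min = price
--             current_index = i
--     return current_min, current_index
--
-- def diverse_souvenires(budget, price_list):
--     amount = 0
--     for _ in range(len(price_list)):
--         min_price, min_index = find_min(price_list)
--         if budget - min_price < 0:
--             return amount
--         budget = budget - min_price
--         amount += 1
--         del price_list[min_index]
--         if len(price_list) == 0:
--             return amount
-- ===== SOURCE B (Python) =====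
-- def diverse_souvenires(budget, price_list):
--     amount = 0
--     for price in sorted(price_list):
--         if price > budget:
--             break
--         budget -= price
--         amount += 1
--     return amount
-- ===== Notes on version B (the rewrite author's own statement) =====
-- stated objective: faster
-- what changed: A repeatedly scans the remaining list for its minimum and deletes it (a quadratic selection loop that also mutates the caller's list); B sorts the prices once and counts the prefix whose running sum stays within the budget.
-- outside the precondition, e.g. on diverse_souvenires(5, []): A returns None, B returns 0
import Mathlib
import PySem

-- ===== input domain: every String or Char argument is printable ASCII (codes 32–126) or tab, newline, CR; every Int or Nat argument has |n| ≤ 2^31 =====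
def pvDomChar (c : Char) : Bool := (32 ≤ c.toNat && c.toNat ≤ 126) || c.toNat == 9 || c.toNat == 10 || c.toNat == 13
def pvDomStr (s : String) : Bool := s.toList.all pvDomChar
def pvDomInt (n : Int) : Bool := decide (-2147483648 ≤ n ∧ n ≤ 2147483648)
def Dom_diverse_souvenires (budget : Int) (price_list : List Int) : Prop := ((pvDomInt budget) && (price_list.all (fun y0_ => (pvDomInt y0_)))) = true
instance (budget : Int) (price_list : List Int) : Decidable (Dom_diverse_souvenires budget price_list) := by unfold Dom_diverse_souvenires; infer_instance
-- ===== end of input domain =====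

-- B replaces A's quadratic select-min-and-delete loop by sort-once-and-count-a-prefix (asymptotically faster).
-- Note: A mutates its price_list argument in place (deletes bought items); the equivalence proved here is about the RETURN value only (B does not mutate).

-- ===== PORT A =====
-- find_min: linear scan tracking (current_min, current_index)
def findMin (price_list : List Int) : Int × Int :=
  -- current_min = price_list[0]: every call site passes a nonempty list, so headD's default is never used
  (PySem.List.enumerate price_list 0).foldl
    (fun cur ip => if ip.2 < cur.1 then (ip.2, ip.1) else cur)
    (price_list.headD 0, (0 : Int))

-- the 'for _ in range(len(price_list))' loop; fuel = initial length.
-- Fuel 0 is reached only for the initially empty list, where Python A returns None (excluded by Pre_).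
def aLoop : Nat → Int → List Int → Int → Int
  | 0, _, _, amount => amount
  | fuel + 1, budget, pl, amount =>
    let mp := findMin pl
    if budget - mp.1 < 0 then amount
    else
      let budget' := budget - mp.1
      let amount' := amount + 1
      -- del price_list[min_index]; min_index is a nonnegative in-range index by construction
      let pl' := pl.eraseIdx mp.2.toNat
      if pl'.length = 0 then amount' else aLoop fuel budget' pl' amount'

def diverse_souvenires (budget : Int) (price_list : List Int) : Int :=
  aLoop price_list.length budget price_list 0

-- ===== PORT B =====
-- for price in sorted(price_list): if price > budget: break; budget -= price; amount += 1
def bLoop : Int → List Int → Int → Int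
  | _, [], amount => amount
  | budget, p :: rest, amount =>
    if p > budget then amount else bLoop (budget - p) rest (amount + 1)

def diverse_souvenires_alt (budget : Int) (price_list : List Int) : Int :=
  bLoop budget (PySem.List.sorted price_list (fun x => x) false) 0

-- ===== PRECONDITION & SPEC =====
-- Pre_ excludes the empty list, on which Python A falls through its loop and returns None (not an int).
def Pre_diverse_souvenires (budget : Int) (price_list : List Int) : Prop := price_list ≠ []
instance (budget : Int) (price_list : List Int) : Decidable (Pre_diverse_souvenires budget price_list) := by unfold Pre_diverse_souvenires; infer_instance
def pvWitness_diverse_souvenires : Int × List Int := (10, [3, 1, 4])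

def Spec_diverse_souvenires (budget : Int) (price_list : List Int) (out : Int) : Prop := out = diverse_souvenires_alt budget price_list
instance (budget : Int) (price_list : List Int) (out : Int) : Decidable (Spec_diverse_souvenires budget price_list out) := by unfold Spec_diverse_souvenires; infer_instance

-- ===== CLAIM (what is proved, stated in full; the proofs are below) =====
def Claim_equal_diverse_souvenires : Prop := ∀ (budget : Int) (price_list : List Int), Dom_diverse_souvenires budget price_list → Pre_diverse_souvenires budget price_list → Spec_diverse_souvenires budget price_list (diverse_souvenires budget price_list)

-- ===== LEMMAS AND PROOFS =====

-- invariant of find_min's fold: the result is the initial pair or some scanned (value, index) pair,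
-- and its value is ≤ the initial value and ≤ every scanned value
theorem foldMin_inv (e : List (Int × Int)) (acc : Int × Int) :
    (e.foldl (fun cur ip => if ip.2 < cur.1 then (ip.2, ip.1) else cur) acc = acc
      ∨ ∃ p ∈ e, e.foldl (fun cur ip => if ip.2 < cur.1 then (ip.2, ip.1) else cur) acc = (p.2, p.1))
    ∧ (e.foldl (fun cur ip => if ip.2 < cur.1 then (ip.2, ip.1) else cur) acc).1 ≤ acc.1
    ∧ ∀ p ∈ e, (e.foldl (fun cur ip => if ip.2 < cur.1 then (ip.2, ip.1) else cur) acc).1 ≤ p.2 := by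
  induction e generalizing acc with
  | nil => simp
  | cons q e ih =>
    simp only [List.foldl_cons]
    by_cases h : q.2 < acc.1
    · simp only [if_pos h]
      obtain ⟨hshape, hle, hall⟩ := ih (q.2, q.1)
      refine ⟨?_, by omega, ?_⟩
      · rcases hshape with h1 | ⟨p, hp, h1⟩
        · exact Or.inr ⟨q, by simp, by simp [h1]⟩
        · exact Or.inr ⟨p, by simp [hp], h1⟩
      · intro p hp
        rcases List.mem_cons.mp hp with rfl | hp
        · omega
        · exact hall p hp
    · simp only [if_neg h]
      obtain ⟨hshape, hle, hall⟩ := ih acc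
      refine ⟨?_, hle, ?_⟩
      · rcases hshape with h1 | ⟨p, hp, h1⟩
        · exact Or.inl h1
        · exact Or.inr ⟨p, by simp [hp], h1⟩
      · intro p hp
        rcases List.mem_cons.mp hp with rfl | hp
        · omega
        · exact hall p hp

theorem findMin_spec (pl : List Int) (h : pl ≠ []) :
    ∃ k : Nat, k < pl.length ∧ (findMin pl).2.toNat = k ∧ pl[k]? = some (findMin pl).1
      ∧ ∀ x ∈ pl, (findMin pl).1 ≤ x := by
  obtain ⟨x0, tl, rfl⟩ := List.exists_cons_of_ne_nil h
  obtain ⟨hshape, hle, hall⟩ := foldMin_inv (PySem.List.enumerate (x0 :: tl) 0) (x0, (0 : Int))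
  have hmin : ∀ x ∈ x0 :: tl, (findMin (x0 :: tl)).1 ≤ x := by
    intro x hx
    obtain ⟨k, hk, hkx⟩ := List.mem_iff_getElem.mp hx
    have hmem : ((0 : Int) + (k : Int), (x0 :: tl)[k]) ∈ PySem.List.enumerate (x0 :: tl) 0 :=
      (PySem.List.mem_enumerate_iff _ _ _).mpr ⟨k, hk, rfl⟩
    exact hkx ▸ hall _ hmem
  rcases hshape with h1 | ⟨p, hp, h1⟩
  · have hfm : findMin (x0 :: tl) = (x0, (0 : Int)) := h1
    exact ⟨0, by simp, by simp [hfm], by simp [hfm], hmin⟩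
  · obtain ⟨k, hk, hpk⟩ := (PySem.List.mem_enumerate_iff _ _ _).mp hp
    have hfm : findMin (x0 :: tl) = (p.2, p.1) := h1
    refine ⟨k, hk, ?_, ?_, hmin⟩
    · rw [hfm, hpk]; simp
    · rw [hfm, hpk, List.getElem?_eq_getElem hk]

-- the sorted list starts with the minimum, and the tail is the sorted list after deleting it
theorem sorted_eraseIdx_min (pl : List Int) (k : Nat) (hk : k < pl.length)
    (hmin : ∀ x ∈ pl, pl[k] ≤ x) :
    PySem.List.sorted pl (fun x => x) false
      = pl[k] :: PySem.List.sorted (pl.eraseIdx k) (fun x => x) false := by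
  apply PySem.List.sorted_id_eq_of_perm_of_pairwise
  · exact (List.Perm.cons _ (PySem.List.sorted_perm _ _ _)).trans
      (List.getElem_cons_eraseIdx_perm hk)
  · refine List.pairwise_cons.mpr ⟨?_, PySem.List.sorted_pairwise _ _⟩
    intro y hy
    have : y ∈ pl.eraseIdx k := (PySem.List.mem_sorted _ _ _ _).mp hy
    exact hmin y (List.mem_of_mem_eraseIdx this)

theorem aLoop_eq_bLoop : ∀ (fuel : Nat) (pl : List Int) (budget amount : Int),
    fuel = pl.length → pl ≠ [] →
    aLoop fuel budget pl amount
      = bLoop budget (PySem.List.sorted pl (fun x => x) false) amount := by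
  intro fuel
  induction fuel with
  | zero => intro pl budget amount hlen hne; exact absurd (List.eq_nil_of_length_eq_zero hlen.symm) hne
  | succ n ih =>
    intro pl budget amount hlen hne
    obtain ⟨k, hk, hidx, hget, hmin⟩ := findMin_spec pl hne
    have hval : pl[k] = (findMin pl).1 := by
      have := List.getElem?_eq_getElem hk
      rw [hget] at this; exact (Option.some.injEq _ _).mp this.symm
    have hsorted : PySem.List.sorted pl (fun x => x) false
        = (findMin pl).1 :: PySem.List.sorted (pl.eraseIdx k) (fun x => x) false := by
      rw [← hval]; exact sorted_eraseIdx_min pl k hk (hval ▸ hmin)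
    rw [hsorted]
    show (if budget - (findMin pl).1 < 0 then amount
      else if (pl.eraseIdx (findMin pl).2.toNat).length = 0 then amount + 1
      else aLoop n (budget - (findMin pl).1) (pl.eraseIdx (findMin pl).2.toNat) (amount + 1)) = _
    rw [hidx]
    simp only [bLoop]
    by_cases hb : budget - (findMin pl).1 < 0
    · rw [if_pos hb, if_pos (by omega)]
    · rw [if_neg hb,
        if_neg (show ¬ ((findMin pl).1 > budget) from by omega)]
      by_cases hz : (pl.eraseIdx k).length = 0
      · rw [if_pos hz]
        have hnil : pl.eraseIdx k = [] := List.eq_nil_of_length_eq_zero hz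
        rw [hnil]
        rfl
      · rw [if_neg hz]
        have hlen' : (pl.eraseIdx k).length = n := by
          rw [List.length_eraseIdx_of_lt hk]; omega
        exact ih (pl.eraseIdx k) (budget - (findMin pl).1) (amount + 1)
          hlen'.symm (fun hnil => hz (by simp [hnil]))

-- ===== VERDICT (by name: the statement is the Claim_ definition above) =====
theorem diverse_souvenires_spec : Claim_equal_diverse_souvenires := by
  intro budget price_list _ hpre
  show diverse_souvenires budget price_list = diverse_souvenires_alt budget price_list
  exact aLoop_eq_bLoop price_list.length price_list budget 0 rfl hpre
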